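-- pv_equiv track=rewrite | github.com/VUHUQ25133/Python | PY0xxxx/PY01056 - CHẴN – LẺ - NGUYÊN TỐ.py | check
-- ===== SOURCE A (Python) =====
-- import math
--
-- def check(s):
--     for i in range(len(s)):
--         if i % 2 != int(s[i]) % 2:
--             return 'NO'
--
--     n = sum(int(i) for i in s)
--     for i in range(2, int(math.sqrt(n)) + 1):
--         if n % i == 0:
--             return 'NO'
--     return 'YES' if n > 1 else 'NO'
-- ===== SOURCE B (Python) =====
-- def check(s):
--     if any(i % 2 != int(c) % 2 for i, c in enumerate(s)):
--         return 'NO'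
--     n = sum(int(c) for c in s)
--     return 'YES' if n > 1 and all(n % i for i in range(2, n)) else 'NO'
-- ===== Notes on version B (the rewrite author's own statement) =====
-- stated objective: simpler
-- what changed: Parity check becomes a single any() over enumerate(s) with no index loop or early returns, and the sqrt-bounded trial-division loop is replaced by a full-range all(n % i for i in range(2, n)) primality test combined into one boolean expression.
import Mathlib
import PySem

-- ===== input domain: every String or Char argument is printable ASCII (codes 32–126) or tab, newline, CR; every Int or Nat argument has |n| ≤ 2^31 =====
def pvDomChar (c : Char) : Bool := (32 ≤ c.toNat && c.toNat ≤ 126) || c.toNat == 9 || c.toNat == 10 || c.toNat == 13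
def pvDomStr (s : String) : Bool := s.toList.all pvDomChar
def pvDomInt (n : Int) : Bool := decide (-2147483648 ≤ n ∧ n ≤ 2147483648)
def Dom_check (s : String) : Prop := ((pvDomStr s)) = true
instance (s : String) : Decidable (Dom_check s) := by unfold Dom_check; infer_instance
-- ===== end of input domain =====

-- B replaces the indexed parity loop by any() over enumerate and the sqrt-bounded
-- trial division by a full-range all(n % i for i in range(2, n)) test: simpler, not faster.


-- ===== PORT A =====
-- int(c) for a single character; the .getD 0 default is unreachable under Pre_check (all digits)
def pyDigit (c : Char) : Int := (PySem.Int.ofStr? (String.singleton c)).getD 0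

-- 'for i in range(len(s)): if i % 2 != int(s[i]) % 2: return "NO"' — some "NO" = early return
def checkParityA (cs : List Char) (i : Int) : Option String :=
  match cs with
  | [] => none
  | c :: rest =>
    if PySem.Int.mod i 2 ≠ PySem.Int.mod (pyDigit c) 2 then some "NO" else checkParityA rest (i + 1)

-- 'for i in range(2, int(math.sqrt(n)) + 1): …; return "YES" if n > 1 else "NO"'
def checkTrialA (n : Int) : List Int → String
  | [] => if n > 1 then "YES" else "NO"
  | i :: rest => if PySem.Int.mod n i = 0 then "NO" else checkTrialA n rest

def check (s : String) : String :=
  match checkParityA s.toList 0 with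
  | some r => r
  | none =>
    let n := (s.toList.map pyDigit).sum
    -- int(math.sqrt(n)) ported as Nat.sqrt: exact for the digit sums reachable here (n < 2^52)
    checkTrialA n (PySem.List.pyRange 2 ((Nat.sqrt n.toNat : Int) + 1) 1)

-- ===== PORT B =====
def check_alt (s : String) : String :=
  if (PySem.List.enumerate s.toList 0).any
      (fun p => decide (PySem.Int.mod p.1 2 ≠ PySem.Int.mod (pyDigit p.2) 2)) then "NO"
  else
    let n := (s.toList.map pyDigit).sum
    if n > 1 && (PySem.List.pyRange 2 n 1).all (fun i => decide (PySem.Int.mod n i ≠ 0)) then "YES"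
    else "NO"

-- ===== PRECONDITION & SPEC =====
-- Pre_ excludes exactly the strings on which int() raises ValueError in both programs:
-- those containing a non-digit character that is reached before any parity mismatch.
def Pre_check (s : String) : Prop :=
  (s.toList.all (fun c => decide ('0' ≤ c ∧ c ≤ '9'))
   || (PySem.List.enumerate (s.toList.takeWhile (fun c => decide ('0' ≤ c ∧ c ≤ '9'))) 0).any
        (fun p => decide (p.1 % 2 ≠ ((p.2.toNat : Int) - 48) % 2))) = true
instance (s : String) : Decidable (Pre_check s) := by unfold Pre_check; infer_instance
def pvWitness_check : String := "0123"
def Spec_check (s : String) (out : String) : Prop := out = check_alt s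
instance (s : String) (out : String) : Decidable (Spec_check s out) := by unfold Spec_check; infer_instance

-- ===== CLAIM (what is proved, stated in full; the proofs are below) =====
def Claim_equal_check : Prop := ∀ (s : String), Dom_check s → Pre_check s → Spec_check s (check s)

-- ===== LEMMAS AND PROOFS =====

theorem mod_two (a : Int) : PySem.Int.mod a 2 = a % 2 :=
  PySem.Int.mod_eq_emod_of_pos (by norm_num)

theorem pyDigit_of_digit (c : Char) (h1 : '0' ≤ c) (h2 : c ≤ '9') :
    pyDigit c = (c.toNat : Int) - 48 := by
  have h1' : 48 ≤ c.toNat := h1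
  have h2' : c.toNat ≤ 57 := h2
  have hc : c = Char.ofNat c.toNat := (Char.ofNat_toNat c).symm
  interval_cases h : c.toNat <;> rw [hc] <;> decide

theorem parityA_eq_any (cs : List Char) (i : Int) :
    checkParityA cs i =
      (if (PySem.List.enumerate cs i).any
          (fun p => decide (PySem.Int.mod p.1 2 ≠ PySem.Int.mod (pyDigit p.2) 2)) then some "NO"
       else none) := by
  induction cs generalizing i with
  | nil => simp [checkParityA, PySem.List.enumerate_nil]
  | cons c rest ih =>
    rw [PySem.List.enumerate_cons]
    simp only [checkParityA, List.any_cons, ih]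
    by_cases h : PySem.Int.mod i 2 = PySem.Int.mod (pyDigit c) 2
    · rw [if_neg (fun hn => hn h)]
      have h' : i % 2 = pyDigit c % 2 := by rw [mod_two, mod_two] at h; exact h
      have hd : (decide (PySem.Int.mod i 2 ≠ PySem.Int.mod (pyDigit c) 2)) = false := by
        simp [h']
      simp only [hd, Bool.false_or]
    · rw [if_pos h]
      have hd : (decide (PySem.Int.mod i 2 ≠ PySem.Int.mod (pyDigit c) 2)) = true := by
        exact decide_eq_true h
      simp only [hd, Bool.true_or]
      simp

theorem trialA_eq_any (n : Int) (l : List Int) :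
    checkTrialA n l =
      (if l.any (fun i => decide (PySem.Int.mod n i = 0)) then "NO"
       else if n > 1 then "YES" else "NO") := by
  induction l with
  | nil => simp [checkTrialA]
  | cons i rest ih =>
    simp only [checkTrialA, List.any_cons, ih]
    by_cases h : PySem.Int.mod n i = 0 <;> simp [h]

-- the number-theoretic core: a divisor in [2, n) exists iff one exists in [2, sqrt n]
theorem divisor_sqrt_iff (N : Nat) (h2 : 2 ≤ N) :
    ((∃ m, 2 ≤ m ∧ m ≤ Nat.sqrt N ∧ m ∣ N) ↔ (∃ m, 2 ≤ m ∧ m < N ∧ m ∣ N)) := by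
  constructor
  · rintro ⟨m, hm2, hms, hmd⟩
    exact ⟨m, hm2, lt_of_le_of_lt hms (Nat.sqrt_lt_self (by omega)), hmd⟩
  · rintro ⟨m, hm2, hmN, hmd⟩
    have hnp : ¬ N.Prime := by
      intro hp
      rcases hp.eq_one_or_self_of_dvd m hmd with h | h <;> omega
    rw [Nat.prime_def_le_sqrt] at hnp
    push Not at hnp
    rcases hnp h2 with ⟨m', hm'2, hm's, hm'd⟩
    exact ⟨m', hm'2, hm's, hm'd⟩

theorem key_iff (n : Int) (hn : 2 ≤ n) :
    (((PySem.List.pyRange 2 ((Nat.sqrt n.toNat : Int) + 1) 1).any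
        (fun i => decide (PySem.Int.mod n i = 0))) = true) ↔
    (((PySem.List.pyRange 2 n 1).all
        (fun i => decide (PySem.Int.mod n i ≠ 0))) = false) := by
  have hN : ((n.toNat : Int)) = n := Int.toNat_of_nonneg (by omega)
  have h2N : 2 ≤ n.toNat := by omega
  simp only [List.any_eq_true, List.all_eq_false, PySem.List.mem_pyRange_one,
    decide_eq_true_iff, not_not, PySem.Int.mod_eq_zero_iff_dvd]
  constructor
  · rintro ⟨i, ⟨hi2, his⟩, hid⟩
    have hm2 : 2 ≤ i.toNat := by omega
    have hms : i.toNat ≤ Nat.sqrt n.toNat := by omega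
    have hmd : i.toNat ∣ n.toNat := by
      rw [← Int.natCast_dvd_natCast, hN, Int.toNat_of_nonneg (by omega : (0:Int) ≤ i)]
      exact hid
    rcases (divisor_sqrt_iff n.toNat h2N).mp ⟨i.toNat, hm2, hms, hmd⟩ with ⟨m, hmm2, hmmN, hmmd⟩
    refine ⟨(m : Int), ⟨by omega, by omega⟩, ?_⟩
    rw [← hN]
    exact Int.natCast_dvd_natCast.mpr hmmd
  · rintro ⟨i, ⟨hi2, hiN⟩, hid⟩
    have hmd : i.toNat ∣ n.toNat := by
      rw [← Int.natCast_dvd_natCast, hN, Int.toNat_of_nonneg (by omega : (0:Int) ≤ i)]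
      exact hid
    rcases (divisor_sqrt_iff n.toNat h2N).mpr ⟨i.toNat, by omega, by omega, hmd⟩ with ⟨m, hmm2, hmms, hmmd⟩
    refine ⟨(m : Int), ⟨by omega, by omega⟩, ?_⟩
    rw [← hN]
    exact Int.natCast_dvd_natCast.mpr hmmd

-- an element of an enumerated prefix is an element of the enumerated full list
theorem enumerate_mem_of_prefix {α : Type} {pre cs : List α} (hp : pre <+: cs)
    {q : Int × α} (hq : q ∈ PySem.List.enumerate pre 0) : q ∈ PySem.List.enumerate cs 0 := by
  rcases (PySem.List.mem_enumerate_iff pre 0 q).mp hq with ⟨k, hk, rfl⟩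
  exact (PySem.List.mem_enumerate_iff cs 0 _).mpr
    ⟨k, lt_of_lt_of_le hk hp.length_le, by rw [List.IsPrefix.getElem hp hk]; rfl⟩

-- ===== VERDICT (by name: the statement is the Claim_ definition above) =====
theorem check_spec : Claim_equal_check := by
  intro s _ hpre0
  unfold Spec_check check check_alt
  rw [parityA_eq_any]
  by_cases hpar : ((PySem.List.enumerate s.toList 0).any
      fun p => decide (PySem.Int.mod p.1 2 ≠ PySem.Int.mod (pyDigit p.2) 2)) = true
  · rw [hpar]
    simp
  · have hdigB : s.toList.all (fun c => decide ('0' ≤ c ∧ c ≤ '9')) = true := by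
      rcases Bool.or_eq_true_iff.mp hpre0 with h | h
      · exact h
      · exfalso
        apply hpar
        rcases List.any_eq_true.mp h with ⟨⟨i, c⟩, hmem, hcond⟩
        have hcmem : c ∈ s.toList.takeWhile (fun c => decide ('0' ≤ c ∧ c ≤ '9')) := by
          rcases (PySem.List.mem_enumerate_iff _ 0 _).mp hmem with ⟨k, hk, heq⟩
          have : c = (s.toList.takeWhile (fun c => decide ('0' ≤ c ∧ c ≤ '9')))[k] := by
            have := congrArg Prod.snd heq
            simpa using this
          rw [this]
          exact List.getElem_mem hk
        have hcdig : ('0' ≤ c ∧ c ≤ '9') := by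
          have := List.mem_takeWhile_imp hcmem
          simpa using this
        apply List.any_eq_true.mpr
        refine ⟨(i, c), ?_, ?_⟩
        · exact enumerate_mem_of_prefix (List.takeWhile_prefix _) hmem
        · have hmis := of_decide_eq_true hcond
          rw [decide_eq_true_iff, mod_two, mod_two,
            pyDigit_of_digit c hcdig.1 hcdig.2]
          exact hmis
    have hpre : ∀ c ∈ s.toList, '0' ≤ c ∧ c ≤ '9' := by
      intro c hc
      have := List.all_eq_true.mp hdigB c hc
      simpa using this
    have hparf : ((PySem.List.enumerate s.toList 0).any
        fun p => decide (PySem.Int.mod p.1 2 ≠ PySem.Int.mod (pyDigit p.2) 2)) = false :=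
      Bool.eq_false_iff.mpr hpar
    rw [hparf]
    simp only []
    rw [trialA_eq_any]
    have hnn : 0 ≤ (s.toList.map pyDigit).sum := by
      apply List.sum_nonneg
      intro x hx
      rcases List.mem_map.mp hx with ⟨c, hc, rfl⟩
      rw [pyDigit_of_digit c (hpre c hc).1 (hpre c hc).2]
      have : 48 ≤ c.toNat := (hpre c hc).1
      omega
    set n := (s.toList.map pyDigit).sum with hn
    by_cases hn1 : n > 1
    · by_cases hany : ((PySem.List.pyRange 2 ((Nat.sqrt n.toNat : Int) + 1) 1).any
          (fun i => decide (PySem.Int.mod n i = 0))) = true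
      · have hall := (key_iff n (by omega)).mp hany
        rw [hany, hall]
        simp
      · have hanyf : ((PySem.List.pyRange 2 ((Nat.sqrt n.toNat : Int) + 1) 1).any
            (fun i => decide (PySem.Int.mod n i = 0))) = false := Bool.eq_false_iff.mpr hany
        have hall : ((PySem.List.pyRange 2 n 1).all
            (fun i => decide (PySem.Int.mod n i ≠ 0))) = true := by
          rcases Bool.eq_false_or_eq_true ((PySem.List.pyRange 2 n 1).all
            (fun i => decide (PySem.Int.mod n i ≠ 0))) with h | h
          · exact h
          · exact absurd ((key_iff n (by omega)).mpr h) hany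
        rw [hanyf, hall]
        simp [hn1]
    · have hrange : PySem.List.pyRange 2 ((Nat.sqrt n.toNat : Int) + 1) 1 = [] := by
        apply PySem.List.pyRange_one_eq_nil
        have h1 : n.toNat ≤ 1 := by omega
        have h2 : Nat.sqrt n.toNat ≤ n.toNat := Nat.sqrt_le_self n.toNat
        omega
      rw [hrange]
      simp [hn1]
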